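-- pv_equiv track=rewrite | github.com/hoonto/reeb | code/pyreeb/pyreeb.py | simplify_triangle_edges
-- ===== SOURCE A (Python) =====
-- import itertools
--
-- def simplify_triangle_edges(edges, tris):
--     simplified_edges = list(edges)
--     for tri in tris:
--         for p,q in itertools.combinations(tri, 2):
--             if (p,q) in simplified_edges:
--                 simplified_edges.remove((p,q))
--             if (q,p) in simplified_edges:
--                 simplified_edges.remove((q,p))
--     return simplified_edges
-- ===== SOURCE B (Python) =====
-- import itertools
--
-- def simplify_triangle_edges(edges, tris):
--     # Count removal requests per directed edge, then one pass over edges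
--     # skipping the first k occurrences of each requested edge.
--     req = {}
--     for tri in tris:
--         for p, q in itertools.combinations(tri, 2):
--             req[(p, q)] = req.get((p, q), 0) + 1
--             req[(q, p)] = req.get((q, p), 0) + 1
--     out = []
--     for e in edges:
--         c = req.get(e, 0)
--         if c > 0:
--             req[e] = c - 1
--         else:
--             out.append(e)
--     return out
-- ===== Notes on version B (the rewrite author's own statement) =====
-- stated objective: faster
-- what changed: Instead of scanning and mutating the edge list for every triangle pair (each membership test and remove is O(E)), B counts removal requests per directed edge in a dict and then makes one pass over edges, skipping the first k occurrences of each requested edge.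
import Mathlib
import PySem

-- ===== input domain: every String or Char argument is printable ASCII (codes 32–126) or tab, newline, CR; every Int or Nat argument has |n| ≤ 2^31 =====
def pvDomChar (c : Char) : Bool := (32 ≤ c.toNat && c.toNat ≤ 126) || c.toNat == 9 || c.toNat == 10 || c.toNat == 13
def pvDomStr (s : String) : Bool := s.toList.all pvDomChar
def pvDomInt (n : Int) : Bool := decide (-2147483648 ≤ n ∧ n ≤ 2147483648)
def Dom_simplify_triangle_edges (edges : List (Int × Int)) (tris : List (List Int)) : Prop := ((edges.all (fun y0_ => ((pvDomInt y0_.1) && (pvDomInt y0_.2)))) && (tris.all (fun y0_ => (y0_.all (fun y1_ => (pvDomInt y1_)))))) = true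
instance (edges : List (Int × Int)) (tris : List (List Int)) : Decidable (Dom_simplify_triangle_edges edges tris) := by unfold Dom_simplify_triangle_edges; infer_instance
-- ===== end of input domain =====

-- B replaces A's per-triangle-pair scan-and-remove of the edge list by a dict of
-- removal-request counts plus one pass over edges (objective: faster).

-- ===== PORT A =====
-- itertools.combinations(tri, 2): pairs (tri[i], tri[j]) with i < j, in Python's order
def pvCombs2 : List Int → List (Int × Int)
  | [] => []
  | x :: xs => xs.map (fun y => (x, y)) ++ pvCombs2 xs

def simplify_triangle_edges (edges : List (Int × Int)) (tris : List (List Int)) : List (Int × Int) :=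
  tris.foldl (fun s tri =>
    (pvCombs2 tri).foldl (fun s pq =>
      -- 'if (p,q) in s: s.remove((p,q))' — List.erase removes the first
      -- occurrence, exact under the membership guard; then the same for (q,p)
      let s1 := if pq ∈ s then s.erase pq else s
      if (pq.2, pq.1) ∈ s1 then s1.erase (pq.2, pq.1) else s1) s) edges

-- ===== PORT B =====
def simplify_triangle_edges_alt (edges : List (Int × Int)) (tris : List (List Int)) : List (Int × Int) :=
  let req : PySem.Dict (Int × Int) Int :=
    tris.foldl (fun d tri =>
      (pvCombs2 tri).foldl (fun d pq =>
        let d := d.insert pq (d.getD pq 0 + 1)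
        d.insert (pq.2, pq.1) (d.getD (pq.2, pq.1) 0 + 1)) d) PySem.Dict.empty
  (edges.foldl (fun (st : List (Int × Int) × PySem.Dict (Int × Int) Int) e =>
      let c := st.2.getD e 0
      if c > 0 then (st.1, st.2.insert e (c - 1)) else (st.1 ++ [e], st.2)) ([], req)).1

-- ===== PRECONDITION & SPEC =====
def Spec_simplify_triangle_edges (edges : List (Int × Int)) (tris : List (List Int)) (out : List (Int × Int)) : Prop := out = simplify_triangle_edges_alt edges tris
instance (edges : List (Int × Int)) (tris : List (List Int)) (out : List (Int × Int)) : Decidable (Spec_simplify_triangle_edges edges tris out) := by unfold Spec_simplify_triangle_edges; infer_instance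

-- ===== CLAIM (what is proved, stated in full; the proofs are below) =====
def Claim_equal_simplify_triangle_edges : Prop := ∀ (edges : List (Int × Int)) (tris : List (List Int)), Dom_simplify_triangle_edges edges tris → Spec_simplify_triangle_edges edges tris (simplify_triangle_edges edges tris)

-- ===== LEMMAS AND PROOFS =====

-- the flattened list of all removal requests, in the order both programs issue them
def pvReqList (tris : List (List Int)) : List (Int × Int) :=
  tris.flatMap (fun t => (pvCombs2 t).flatMap (fun pq => [pq, (pq.2, pq.1)]))

-- reference: drop the first (c e) occurrences of each e while traversing edges
def pvSkip : List (Int × Int) → ((Int × Int) → Nat) → List (Int × Int)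
  | [], _ => []
  | e :: es, c =>
      if c e = 0 then e :: pvSkip es c
      else pvSkip es (fun v => if v = e then c v - 1 else c v)

theorem pvSkip_zero (edges : List (Int × Int)) : pvSkip edges (fun _ => 0) = edges := by
  induction edges with
  | nil => rfl
  | cons e es ih => simp [pvSkip, ih]

theorem pvSkip_bump (edges : List (Int × Int)) (c : (Int × Int) → Nat) (r : Int × Int) :
    pvSkip edges (fun v => if v = r then c v + 1 else c v) = pvSkip (edges.erase r) c := by
  induction edges generalizing c with
  | nil => rfl
  | cons e es ih =>
    rcases eq_or_ne e r with her | her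
    · subst her
      rw [List.erase_cons_head]
      have hc : ¬ ((if e = e then c e + 1 else c e) = 0) := by simp
      simp only [pvSkip]
      have hfun : (fun v => if v = e then (if v = e then c v + 1 else c v) - 1 else (if v = e then c v + 1 else c v)) = c := by
        funext v
        rcases eq_or_ne v e with hv | hv <;> simp [hv]
      rw [hfun]
      simp
    · rw [List.erase_cons_tail (by simpa using her)]
      by_cases hce : c e = 0
      · have h1 : (if e = r then c e + 1 else c e) = 0 := by simp [her, hce]
        simp only [pvSkip, if_pos h1, if_pos hce]
        rw [ih c]
      · have h1 : ¬ ((if e = r then c e + 1 else c e) = 0) := by simp [her, hce]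
        simp only [pvSkip, if_neg h1, if_neg hce]
        have hfun : (fun v => if v = e then (if v = r then c v + 1 else c v) - 1 else (if v = r then c v + 1 else c v))
            = (fun v => if v = r then (if v = e then c v - 1 else c v) + 1 else (if v = e then c v - 1 else c v)) := by
          funext v
          rcases eq_or_ne v e with hv | hv
          · subst hv; simp [her]
          · rcases eq_or_ne v r with hvr | hvr
            · subst hvr; simp [hv]
            · simp [hv, hvr]
        rw [hfun, ih]

theorem pvFoldl_erase_eq_skip (rs : List (Int × Int)) (edges : List (Int × Int)) :
    rs.foldl (fun s e => s.erase e) edges = pvSkip edges (fun v => rs.count v) := by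
  induction rs generalizing edges with
  | nil => simp [pvSkip_zero]
  | cons r rs ih =>
    simp only [List.foldl_cons]
    rw [ih]
    have hc : (fun v => (r :: rs).count v) = (fun v => if v = r then rs.count v + 1 else rs.count v) := by
      funext v
      rcases eq_or_ne v r with hv | hv
      · subst hv; simp
      · simp [hv, Ne.symm hv]
    rw [hc, pvSkip_bump]

theorem pvA_eq_foldl_erase (edges : List (Int × Int)) (tris : List (List Int)) :
    simplify_triangle_edges edges tris = (pvReqList tris).foldl (fun s e => s.erase e) edges := by
  unfold simplify_triangle_edges
  have hpair : (fun (s : List (Int × Int)) (pq : Int × Int) =>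
        let s1 := if pq ∈ s then s.erase pq else s
        if (pq.2, pq.1) ∈ s1 then s1.erase (pq.2, pq.1) else s1)
      = (fun s pq => [pq, (pq.2, pq.1)].foldl (fun s e => s.erase e) s) := by
    funext s pq
    simp only [List.foldl_cons, List.foldl_nil]
    by_cases h1 : pq ∈ s
    · by_cases h2 : (pq.2, pq.1) ∈ s.erase pq <;>
        simp [h1, h2, List.erase_of_not_mem]
    · by_cases h2 : (pq.2, pq.1) ∈ s <;>
        simp [h1, h2, List.erase_of_not_mem]
  rw [hpair]
  simp only [pvReqList, List.foldl_flatMap]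

theorem pvReq_getD (tris : List (List Int)) (v : Int × Int) :
    (tris.foldl (fun d tri =>
      (pvCombs2 tri).foldl (fun d pq =>
        let d := d.insert pq (d.getD pq 0 + 1)
        d.insert (pq.2, pq.1) (d.getD (pq.2, pq.1) 0 + 1)) d) PySem.Dict.empty).getD v 0
    = ((pvReqList tris).count v : Int) := by
  have h : (tris.foldl (fun d tri =>
        (pvCombs2 tri).foldl (fun d pq =>
          let d := d.insert pq (d.getD pq 0 + 1)
          d.insert (pq.2, pq.1) (d.getD (pq.2, pq.1) 0 + 1)) d) (PySem.Dict.empty : PySem.Dict (Int × Int) Int))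
      = (pvReqList tris).foldl (fun d x => d.insert x (d.getD x 0 + 1)) (PySem.Dict.empty : PySem.Dict (Int × Int) Int) := by
    simp only [pvReqList, List.foldl_flatMap, List.foldl_cons, List.foldl_nil]
  rw [h, PySem.Dict.getD_foldl_insert_add_one, PySem.Dict.getD_empty]
  simp

theorem pvB_pass (edges : List (Int × Int)) (acc : List (Int × Int))
    (d : PySem.Dict (Int × Int) Int) (c : (Int × Int) → Nat)
    (h : ∀ v, d.getD v 0 = (c v : Int)) :
    (edges.foldl (fun (st : List (Int × Int) × PySem.Dict (Int × Int) Int) e =>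
        let cc := st.2.getD e 0
        if cc > 0 then (st.1, st.2.insert e (cc - 1)) else (st.1 ++ [e], st.2)) (acc, d)).1
    = acc ++ pvSkip edges c := by
  induction edges generalizing acc d c with
  | nil => simp [pvSkip]
  | cons e es ih =>
    simp only [List.foldl_cons]
    by_cases hce : c e = 0
    · have hpos : ¬ (d.getD e 0 > 0) := by rw [h e]; omega
      rw [if_neg hpos, ih (acc ++ [e]) d c h]
      simp [pvSkip, hce]
    · have hpos : d.getD e 0 > 0 := by rw [h e]; omega
      rw [if_pos hpos,
        ih acc (d.insert e (d.getD e 0 - 1)) (fun v => if v = e then c v - 1 else c v) ?_]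
      · simp [pvSkip, hce]
      · intro v
        rw [PySem.Dict.getD_insert]
        by_cases hv : v = e
        · simp [hv, h e]; omega
        · simp [hv, h v]

-- ===== VERDICT (by name: the statement is the Claim_ definition above) =====
theorem simplify_triangle_edges_spec : Claim_equal_simplify_triangle_edges := by
  intro edges tris _
  unfold Spec_simplify_triangle_edges
  have hB : simplify_triangle_edges_alt edges tris
      = pvSkip edges (fun v => (pvReqList tris).count v) := by
    show (edges.foldl (fun (st : List (Int × Int) × PySem.Dict (Int × Int) Int) e =>
        let c := st.2.getD e 0
        if c > 0 then (st.1, st.2.insert e (c - 1)) else (st.1 ++ [e], st.2))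
        ([], tris.foldl (fun d tri =>
          (pvCombs2 tri).foldl (fun d pq =>
            let d := d.insert pq (d.getD pq 0 + 1)
            d.insert (pq.2, pq.1) (d.getD (pq.2, pq.1) 0 + 1)) d) PySem.Dict.empty)).1 = _
    rw [pvB_pass edges [] _ (fun v => (pvReqList tris).count v) (fun v => pvReq_getD tris v)]
    simp
  rw [hB, pvA_eq_foldl_erase, pvFoldl_erase_eq_skip]
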